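-- pv_equiv track=rewrite | github.com/humanaiconvention/prism | experiments/sgt/format_outcome_table.py | overall_call
-- ===== SOURCE A (Python) =====
-- def overall_call(per_scale: dict[str, bool | None]) -> str:
--     """supported = both scales pass; partial = one scale; unsupported = neither."""
--     vals = [v for v in per_scale.values() if v is not None]
--     if not vals:
--         return "n/a (no data)"
--     if all(v is True for v in vals) and len(vals) >= 2:
--         return "**supported**"
--     if any(v is True for v in vals):
--         return "**partial**"
--     return "**unsupported**"
-- ===== SOURCE B (Python) =====
-- # Table-driven finite state machine: states EMPTY, T1 (one True), T2 (>=2 Trues, all True),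
-- # F (all False so far), M (mixed True/False). The verdict is a table lookup on the final state.
-- _TRANS = {
--     ("EMPTY", True): "T1", ("EMPTY", False): "F",
--     ("T1", True): "T2",    ("T1", False): "M",
--     ("T2", True): "T2",    ("T2", False): "M",
--     ("F", True): "M",      ("F", False): "F",
--     ("M", True): "M",      ("M", False): "M",
-- }
-- _RESULT = {
--     "EMPTY": "n/a (no data)",
--     "T2": "**supported**",
--     "T1": "**partial**",
--     "M": "**partial**",
--     "F": "**unsupported**",
-- }
--
-- def overall_call(per_scale: dict[str, bool | None]) -> str:
--     """supported = both scales pass; partial = one scale; unsupported = neither."""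
--     state = "EMPTY"
--     for v in per_scale.values():
--         if v is not None:
--             state = _TRANS[(state, v)]
--     return _RESULT[state]
-- ===== Notes on version B (the rewrite author's own statement) =====
-- stated objective: alternative
-- what changed: Replaced A's filtered intermediate list with separate all()/any()/len() scans by a table-driven five-state finite automaton (EMPTY/T1/T2/F/M) advanced once per value, with the verdict read from a result table on the final state.
import Mathlib
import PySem

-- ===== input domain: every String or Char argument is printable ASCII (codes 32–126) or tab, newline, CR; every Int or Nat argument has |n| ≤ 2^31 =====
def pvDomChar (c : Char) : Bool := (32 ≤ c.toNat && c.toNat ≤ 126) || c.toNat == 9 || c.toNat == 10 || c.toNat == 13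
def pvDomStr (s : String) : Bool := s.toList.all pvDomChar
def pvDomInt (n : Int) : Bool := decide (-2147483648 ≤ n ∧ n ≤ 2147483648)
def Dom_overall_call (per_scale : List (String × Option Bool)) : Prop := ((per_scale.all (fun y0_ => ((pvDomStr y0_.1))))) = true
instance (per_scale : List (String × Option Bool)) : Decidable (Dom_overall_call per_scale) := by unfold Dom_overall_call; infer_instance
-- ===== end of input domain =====

-- B replaces A's filtered list + all()/any()/len() scans by a table-driven five-state automaton; objective: alternative.

-- ===== PORT A =====
def overall_call (per_scale : List (String × Option Bool)) : String :=
  let vals := per_scale.filterMap (fun p => p.2)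
  if vals = [] then "n/a (no data)"
  else if (vals.all (fun v => v = true)) = true ∧ 2 ≤ vals.length then "**supported**"
  else if (vals.any (fun v => v = true)) = true then "**partial**"
  else "**unsupported**"

-- ===== PORT B =====
-- the automaton's states (Source B's string state names)
inductive PvState | EMPTY | T1 | T2 | F | M
deriving DecidableEq, Repr

-- Source B's _TRANS table, one entry per (state, value) pair
def pvTrans : PvState → Bool → PvState
  | .EMPTY, true  => .T1
  | .EMPTY, false => .F
  | .T1,    true  => .T2
  | .T1,    false => .M
  | .T2,    true  => .T2
  | .T2,    false => .M
  | .F,     true  => .M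
  | .F,     false => .F
  | .M,     true  => .M
  | .M,     false => .M

-- Source B's _RESULT table
def pvResult : PvState → String
  | .EMPTY => "n/a (no data)"
  | .T2    => "**supported**"
  | .T1    => "**partial**"
  | .M     => "**partial**"
  | .F     => "**unsupported**"

def overall_call_alt (per_scale : List (String × Option Bool)) : String :=
  pvResult (per_scale.foldl
    (fun s p => match p.2 with
      | none => s
      | some v => pvTrans s v) PvState.EMPTY)

-- ===== PRECONDITION & SPEC =====
def Spec_overall_call (per_scale : List (String × Option Bool)) (out : String) : Prop := out = overall_call_alt per_scale
instance (per_scale : List (String × Option Bool)) (out : String) : Decidable (Spec_overall_call per_scale out) := by unfold Spec_overall_call; infer_instance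

-- ===== CLAIM (what is proved, stated in full; the proofs are below) =====
def Claim_equal_overall_call : Prop := ∀ (per_scale : List (String × Option Bool)), Dom_overall_call per_scale → Spec_overall_call per_scale (overall_call per_scale)

-- ===== LEMMAS AND PROOFS =====

-- the state reached by the automaton on a list of booleans
def pvStateOf (vals : List Bool) : PvState := vals.foldl pvTrans PvState.EMPTY

-- closed-form characterisation of the reached state
def pvSpecState (vals : List Bool) : PvState :=
  if vals = [] then .EMPTY
  else if (vals.all (fun v => v = true)) = true then (if 2 ≤ vals.length then .T2 else .T1)
  else if (vals.any (fun v => v = true)) = true then .M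
  else .F

-- B's fold over pairs = the automaton run on A's filtered value list
theorem pv_fold_filterMap (l : List (String × Option Bool)) (s : PvState) :
    l.foldl (fun s p => match p.2 with | none => s | some v => pvTrans s v) s
      = (l.filterMap (fun p => p.2)).foldl pvTrans s := by
  induction l generalizing s with
  | nil => rfl
  | cons h t ih =>
    cases hv : h.2 <;> simp [List.foldl, hv, ih]

-- one automaton step preserves the characterisation
theorem pv_trans_spec (s : List Bool) (hs : s ≠ []) (v : Bool) :
    pvTrans (pvSpecState s) v = pvSpecState (s ++ [v]) := by
  have hlen1 : 1 ≤ s.length := List.length_pos_of_ne_nil hs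
  by_cases hF : false ∈ s
  · by_cases hT : true ∈ s <;>
      by_cases h2 : 2 ≤ s.length <;>
      cases v <;>
      simp [pvSpecState, pvTrans, hs, hF, hT, h2, List.all_append, List.any_append]
  · have hT : true ∈ s := by
      rcases List.exists_mem_of_ne_nil s hs with ⟨b, hb⟩
      cases hbv : b <;> simp_all
    by_cases h2 : 2 ≤ s.length <;>
      cases v <;>
      simp [pvSpecState, pvTrans, hs, hF, hT, h2, List.all_append, List.any_append]

theorem pv_state_spec (vals : List Bool) : pvStateOf vals = pvSpecState vals := by
  induction vals using List.reverseRecOn with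
  | nil => rfl
  | append_singleton l v ih =>
    have h1 : pvStateOf (l ++ [v]) = pvTrans (pvStateOf l) v := by
      simp [pvStateOf, List.foldl_append]
    rw [h1, ih]
    rcases l with _ | ⟨a, t⟩
    · cases v <;> decide
    · exact pv_trans_spec (a :: t) (by simp) v

-- ===== VERDICT (by name: the statement is the Claim_ definition above) =====
theorem overall_call_spec : Claim_equal_overall_call := by
  intro per_scale _
  unfold Spec_overall_call overall_call overall_call_alt
  rw [pv_fold_filterMap]
  have hst := pv_state_spec (per_scale.filterMap (fun p => p.2))
  rw [pvStateOf] at hst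
  rw [hst]
  set vals := per_scale.filterMap (fun p => p.2) with hvals
  unfold pvSpecState
  by_cases h0 : vals = []
  · simp [h0, pvResult]
  · by_cases hF : false ∈ vals
    · by_cases hT : true ∈ vals <;>
        by_cases h2 : 2 ≤ vals.length <;>
        simp [h0, hF, hT, h2, pvResult]
    · have hT : true ∈ vals := by
        rcases List.exists_mem_of_ne_nil vals h0 with ⟨b, hb⟩
        cases hbv : b <;> simp_all
      by_cases h2 : 2 ≤ vals.length <;>
        simp [h0, hF, hT, h2, pvResult]
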